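-- pv_equiv track=rewrite | github.com/emalcolm837/CDB | app/services/team_stats_service.py | _normalize_stat_keys
-- ===== SOURCE A (Python) =====
-- def _normalize_stat_keys(data):
--     if data is None:
--         return None
--     mapping = {
--         "oreb": "OREB",
--         "fg": "FG",
--         "fga": "FGA",
--         "fg3": "FG3",
--         "fga3": "FGA3",
--         "ft": "FT",
--         "fta": "FTA",
--         "pm": "PM",
--     }
--     out = dict(data)
--     for src, dest in mapping.items():
--         if src in out and dest not in out:
--             out[dest] = out.pop(src)
--     return out
-- ===== SOURCE B (Python) =====
-- def _normalize_stat_keys(data):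
--     if data is None:
--         return None
--     mapping = {
--         "oreb": "OREB",
--         "fg": "FG",
--         "fga": "FGA",
--         "fg3": "FG3",
--         "fga3": "FGA3",
--         "ft": "FT",
--         "fta": "FTA",
--         "pm": "PM",
--     }
--     d = dict(data)
--     # which keys actually get renamed (source present, destination absent)
--     moved = {src: dest for src, dest in mapping.items() if src in d and dest not in d}
--     # keep the untouched entries in their original order, then append the renamed ones
--     out = {k: v for k, v in d.items() if k not in moved}
--     out.update((dest, d[src]) for src, dest in moved.items())
--     return out
-- ===== Notes on version B (the rewrite author's own statement) =====
-- stated objective: alternative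
-- what changed: Instead of mutating a copy with pop/re-add per mapping entry, B computes the set of renamed keys once, builds the kept entries with a single filtering comprehension and appends all renamed entries in one batch update.
import Mathlib
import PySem

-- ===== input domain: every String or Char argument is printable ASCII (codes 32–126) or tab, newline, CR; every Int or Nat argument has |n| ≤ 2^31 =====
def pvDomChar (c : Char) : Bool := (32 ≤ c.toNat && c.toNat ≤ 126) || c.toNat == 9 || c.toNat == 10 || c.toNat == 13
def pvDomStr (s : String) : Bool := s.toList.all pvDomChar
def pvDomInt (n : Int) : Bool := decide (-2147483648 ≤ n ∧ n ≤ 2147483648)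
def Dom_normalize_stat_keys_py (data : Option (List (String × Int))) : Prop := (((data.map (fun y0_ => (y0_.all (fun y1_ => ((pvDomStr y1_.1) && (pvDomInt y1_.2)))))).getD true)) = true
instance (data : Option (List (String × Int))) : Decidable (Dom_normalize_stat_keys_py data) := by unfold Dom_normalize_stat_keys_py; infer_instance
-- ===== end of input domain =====

-- B keeps untouched entries in place and appends the renamed ones in one batch instead of A's
-- per-entry pop/re-add on a mutated copy; same cost, different decomposition (objective: alternative).

-- ===== PORT A =====
-- the fixed mapping dict of A (literal; iterated in insertion order)
def pvMapping : List (String × String) :=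
  [("oreb", "OREB"), ("fg", "FG"), ("fga", "FGA"), ("fg3", "FG3"),
   ("fga3", "FGA3"), ("ft", "FT"), ("fta", "FTA"), ("pm", "PM")]

def normalize_stat_keys_py (data : Option (List (String × Int))) : Option (List (String × Int)) :=
  match data with
  | none => none
  | some l =>
    -- out = dict(data); for src, dest in mapping.items(): if src in out and dest not in out: out[dest] = out.pop(src)
    let out := pvMapping.foldl
      (fun out p =>
        if out.contains p.1 && !out.contains p.2 then
          match out.pop? p.1 with
          | some (v, out') => out'.insert p.2 v
          | none => out  -- unreachable: the guard checked `p.1 in out`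
        else out)
      (PySem.Dict.ofList l)
    some out.items

-- ===== PORT B =====
def normalize_stat_keys_py_alt (data : Option (List (String × Int))) : Option (List (String × Int)) :=
  match data with
  | none => none
  | some l =>
    let d := PySem.Dict.ofList l
    -- moved = {src: dest for src, dest in mapping.items() if src in d and dest not in d}
    let moved := pvMapping.filter (fun p => d.contains p.1 && !d.contains p.2)
    -- out = {k: v for k, v in d.items() if k not in moved}
    let kept := d.items.filter (fun kv => !(moved.any (fun p => p.1 == kv.1)))
    -- out.update((dest, d[src]) for src, dest in moved.items());  d[src] is present by construction, so getD is exact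
    some (kept ++ moved.map (fun p => (p.2, d.getD p.1 0)))

-- ===== PRECONDITION & SPEC =====
def Spec_normalize_stat_keys_py (data : Option (List (String × Int))) (out : Option (List (String × Int))) : Prop := out = normalize_stat_keys_py_alt data
instance (data : Option (List (String × Int))) (out : Option (List (String × Int))) : Decidable (Spec_normalize_stat_keys_py data out) := by unfold Spec_normalize_stat_keys_py; infer_instance

-- ===== CLAIM (what is proved, stated in full; the proofs are below) =====
def Claim_equal_normalize_stat_keys_py : Prop := ∀ (data : Option (List (String × Int))), Dom_normalize_stat_keys_py data → Spec_normalize_stat_keys_py data (normalize_stat_keys_py data)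

-- ===== LEMMAS AND PROOFS =====

theorem pv_contains_erase (d : PySem.Dict String Int) (k k' : String) :
    (d.erase k).contains k' = (!(k' == k) && d.contains k') := by
  rw [Bool.eq_iff_iff]
  simp only [PySem.Dict.erase, PySem.Dict.contains, List.any_eq_true, List.mem_filter,
    Bool.and_eq_true, Bool.not_eq_true', beq_eq_false_iff_ne, beq_iff_eq, ne_eq]
  constructor
  · rintro ⟨p, ⟨hm, hne⟩, he⟩; exact ⟨he ▸ hne, p, hm, he⟩
  · rintro ⟨hne, p, hm, he⟩; exact ⟨p, ⟨hm, he ▸ hne⟩, he⟩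

theorem pv_find?_filter_ne (l : List (String × Int)) (k k' : String) (h : k' ≠ k) :
    (l.filter (fun p => !(p.1 == k))).find? (fun p => p.1 == k') = l.find? (fun p => p.1 == k') := by
  induction l with
  | nil => rfl
  | cons a l ih =>
    by_cases ha : a.1 = k
    · have h1 : (a.1 == k) = true := beq_iff_eq.mpr ha
      have h2 : (a.1 == k') = false := beq_eq_false_iff_ne.mpr (by rw [ha]; exact fun e => h e.symm)
      simp [h1, h2, ih]
    · have h1 : (a.1 == k) = false := beq_eq_false_iff_ne.mpr ha
      cases h2 : (a.1 == k') with
      | true => simp [h1, h2]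
      | false => simp [h1, h2, ih]

theorem pv_getD_erase_of_ne (d : PySem.Dict String Int) (k k' : String) (h : k' ≠ k) (v : Int) :
    (d.erase k).getD k' v = d.getD k' v := by
  simp only [PySem.Dict.getD, PySem.Dict.get?, PySem.Dict.erase]
  rw [pv_find?_filter_ne d.items k k' h]

theorem pv_nodup_keys_erase (d : PySem.Dict String Int) (k : String) (h : d.keys.Nodup) :
    (d.erase k).keys.Nodup := by
  simp only [PySem.Dict.keys, PySem.Dict.erase] at *
  exact (List.Sublist.map _ List.filter_sublist).nodup h

theorem pv_main (m : List (String × String)) (d : PySem.Dict String Int)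
    (hnd : d.keys.Nodup)
    (hsrc : (m.map Prod.fst).Nodup)
    (hdst : (m.map Prod.snd).Nodup)
    (hdisj : ∀ p ∈ m, ∀ q ∈ m, p.2 ≠ q.1) :
    (m.foldl
      (fun out p =>
        if out.contains p.1 && !out.contains p.2 then
          match out.pop? p.1 with
          | some (v, out') => out'.insert p.2 v
          | none => out
        else out)
      d).items
    = d.items.filter (fun kv => !((m.filter (fun p => d.contains p.1 && !d.contains p.2)).any (fun p => p.1 == kv.1)))
      ++ (m.filter (fun p => d.contains p.1 && !d.contains p.2)).map (fun p => (p.2, d.getD p.1 0)) := by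
  induction m generalizing d with
  | nil => simp
  | cons hd tl ih =>
    obtain ⟨s, t⟩ := hd
    simp only [List.foldl_cons, List.filter_cons]
    by_cases hcond : (d.contains s && !d.contains t) = true
    · -- the entry is renamed
      obtain ⟨hs, ht⟩ := Bool.and_eq_true_iff.mp hcond
      rw [Bool.not_eq_eq_eq_not, Bool.not_true] at ht
      have hget : d.get? s = some (d.getD s 0) := by
        have : (d.get? s).isSome := by
          rw [← PySem.Dict.contains_eq_isSome_get?]; exact hs
        obtain ⟨v, hv⟩ := Option.isSome_iff_exists.mp this
        simp [PySem.Dict.getD, hv]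
      have hpop : d.pop? s = some (d.getD s 0, d.erase s) := by
        simp [PySem.Dict.pop?, hget]
      have hterase : (d.erase s).contains t = false := by
        rw [pv_contains_erase, ht]; simp
      set d' := (d.erase s).insert t (d.getD s 0) with hd'
      have hitems' : d'.items = d.items.filter (fun kv => !(kv.1 == s)) ++ [(t, d.getD s 0)] := by
        rw [hd', PySem.Dict.items_insert_of_not_contains _ _ hterase]
        rfl
      have hnd' : d'.keys.Nodup := PySem.Dict.nodup_keys_insert _ _ _ (pv_nodup_keys_erase d s hnd)
      -- facts about tail entries: their keys differ from s and t
      have htl_ne : ∀ p ∈ tl, p.1 ≠ s ∧ p.1 ≠ t ∧ p.2 ≠ s ∧ p.2 ≠ t := by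
        intro p hp
        refine ⟨?_, ?_, ?_, ?_⟩
        · intro h; exact (List.nodup_cons.mp hsrc).1 (List.mem_map.mpr ⟨p, hp, h⟩)
        · exact (hdisj (s, t) (by simp) p (List.mem_cons_of_mem _ hp)).symm
        · exact hdisj p (List.mem_cons_of_mem _ hp) (s, t) (by simp)
        · intro h; exact (List.nodup_cons.mp hdst).1 (List.mem_map.mpr ⟨p, hp, h⟩)
      have hcont' : ∀ p ∈ tl, (d'.contains p.1 && !d'.contains p.2) = (d.contains p.1 && !d.contains p.2) := by
        intro p hp
        obtain ⟨h1, h2, h3, h4⟩ := htl_ne p hp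
        rw [hd', PySem.Dict.contains_insert, PySem.Dict.contains_insert,
            pv_contains_erase, pv_contains_erase]
        have e1 : (p.1 == s) = false := beq_eq_false_iff_ne.mpr h1
        have e2 : (p.1 == t) = false := beq_eq_false_iff_ne.mpr h2
        have e3 : (p.2 == s) = false := beq_eq_false_iff_ne.mpr h3
        have e4 : (p.2 == t) = false := beq_eq_false_iff_ne.mpr h4
        simp [e1, e2, e3, e4]
      have hgetD' : ∀ p ∈ tl, (d.contains p.1 && !d.contains p.2) = true → d'.getD p.1 0 = d.getD p.1 0 := by
        intro p hp _
        obtain ⟨h1, h2, _, _⟩ := htl_ne p hp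
        rw [hd', PySem.Dict.getD_insert]
        simp only [h2, if_false]
        exact pv_getD_erase_of_ne d s p.1 h1 0
      have hfilter_eq : tl.filter (fun p => d'.contains p.1 && !d'.contains p.2)
          = tl.filter (fun p => d.contains p.1 && !d.contains p.2) :=
        List.filter_congr (fun p hp => hcont' p hp)
      rw [if_pos hcond, hpop]
      rw [ih d' hnd' (List.nodup_cons.mp hsrc).2 (List.nodup_cons.mp hdst).2
        (fun p hp q hq => hdisj p (List.mem_cons_of_mem _ hp) q (List.mem_cons_of_mem _ hq))]
      rw [hfilter_eq, if_pos hcond]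
      rw [hitems', List.filter_append, List.filter_filter]
      have hmap_eq : (tl.filter (fun p => d.contains p.1 && !d.contains p.2)).map (fun p => (p.2, d'.getD p.1 0))
          = (tl.filter (fun p => d.contains p.1 && !d.contains p.2)).map (fun p => (p.2, d.getD p.1 0)) := by
        apply List.map_congr_left
        intro p hp
        rw [hgetD' p (List.mem_filter.mp hp).1 (List.mem_filter.mp hp).2]
      rw [hmap_eq]
      have hkeep : ∀ kv ∈ d.items,
          (!(tl.filter (fun p => d.contains p.1 && !d.contains p.2)).any (fun p => p.1 == kv.1) && !(kv.1 == s))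
          = !((((s, t) :: tl.filter (fun p => d.contains p.1 && !d.contains p.2))).any (fun p => p.1 == kv.1)) := by
        intro kv _
        simp only [List.any_cons, Bool.not_or]
        rw [Bool.and_comm]
        congr 1
        cases h : kv.1 == s with
        | true => simp [eq_of_beq h]
        | false =>
          cases h2 : (s == kv.1) with
          | true => rw [eq_of_beq h2] at h; simp at h
          | false => simp
      have htkeep : (List.filter (fun kv => !(tl.filter (fun p => d.contains p.1 && !d.contains p.2)).any (fun p => p.1 == kv.1)) [(t, d.getD s 0)])
          = [(t, d.getD s 0)] := by
        simp only [List.filter_cons, List.filter_nil]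
        have : ((tl.filter (fun p => d.contains p.1 && !d.contains p.2)).any (fun p => p.1 == (t, d.getD s 0).1)) = false := by
          rw [List.any_eq_false]
          intro p hp h
          exact (htl_ne p (List.mem_filter.mp hp).1).2.1 (eq_of_beq h)
        rw [this]; rfl
      rw [List.filter_congr hkeep, htkeep]
      simp
    · -- the entry is not renamed
      rw [if_neg hcond, if_neg hcond]
      exact ih d hnd (List.nodup_cons.mp hsrc).2 (List.nodup_cons.mp hdst).2
        (fun p hp q hq => hdisj p (List.mem_cons_of_mem _ hp) q (List.mem_cons_of_mem _ hq))

-- ===== VERDICT (by name: the statement is the Claim_ definition above) =====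
theorem normalize_stat_keys_py_spec : Claim_equal_normalize_stat_keys_py := by
  intro data _
  unfold Spec_normalize_stat_keys_py normalize_stat_keys_py normalize_stat_keys_py_alt
  match data with
  | none => rfl
  | some l =>
    simp only
    rw [pv_main pvMapping (PySem.Dict.ofList l) (PySem.Dict.nodup_keys_ofList l)
      (by decide) (by decide) (by decide)]
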